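-- pv_equiv track=rewrite | github.com/turesheim/SIDScore | tools/import_mutopia_beetson.py | format_voice_tokens
-- ===== SOURCE A (Python) =====
-- def format_voice_tokens(tokens: list[str], indent: str = "  ", max_tokens_per_line: int = 16) -> str:
--     lines: list[str] = []
--     i = 0
--     while i < len(tokens):
--         chunk = tokens[i:i + max_tokens_per_line]
--         lines.append(indent + " ".join(chunk))
--         i += max_tokens_per_line
--     if not lines:
--         lines.append(indent + "R1")
--     return "\n".join(lines)
-- ===== SOURCE B (Python) =====
-- def format_voice_tokens(tokens: list[str], indent: str = "  ", max_tokens_per_line: int = 16) -> str: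
--     lines: list[str] = []
--     current: list[str] = []
--     for tok in tokens:
--         current.append(tok)
--         if len(current) == max_tokens_per_line:
--             lines.append(indent + " ".join(current))
--             current = []
--     if current:
--         lines.append(indent + " ".join(current))
--     if not lines:
--         lines.append(indent + "R1")
--     return "\n".join(lines)
-- ===== Notes on version B (the rewrite author's own statement) =====
-- stated objective: alternative
-- what changed: Replaces A's index-based while loop that slices tokens[i:i+max] with a single streaming pass that accumulates tokens into a buffer and flushes it whenever it reaches max_tokens_per_line.
import Mathlib
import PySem

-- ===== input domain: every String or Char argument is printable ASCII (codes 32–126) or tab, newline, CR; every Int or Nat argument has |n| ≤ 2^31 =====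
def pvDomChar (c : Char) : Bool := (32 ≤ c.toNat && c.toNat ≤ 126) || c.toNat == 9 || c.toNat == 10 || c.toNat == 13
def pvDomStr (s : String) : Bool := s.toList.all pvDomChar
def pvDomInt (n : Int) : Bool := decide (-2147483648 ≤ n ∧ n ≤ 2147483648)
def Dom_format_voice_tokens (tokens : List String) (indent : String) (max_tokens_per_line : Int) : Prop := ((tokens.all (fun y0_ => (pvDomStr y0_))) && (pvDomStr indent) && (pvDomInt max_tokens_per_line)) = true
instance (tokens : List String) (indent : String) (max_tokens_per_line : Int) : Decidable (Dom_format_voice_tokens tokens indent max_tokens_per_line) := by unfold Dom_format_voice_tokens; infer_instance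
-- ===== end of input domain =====

-- B replaces A's index/slice while-loop by a single streaming pass with a flush-on-full buffer
-- (alternative decomposition, same cost; return-value equivalence proved on Pre_, which only
-- excludes A's non-terminating inputs).

-- ===== PORT A =====
-- the while loop, fuel-bounded (fuel = tokens.length + 1 suffices whenever the Python loop
-- terminates, i.e. on Pre_; each iteration advances i by max_tokens_per_line ≥ 1)
def fvtLoopA (tokens : List String) (indent : String) (m : Int) :
    Nat → Int → List String → List String
  | 0, _, lines => lines
  | fuel + 1, i, lines =>
    if i < (tokens.length : Int) then
      let chunk := PySem.List.slice tokens (some i) (some (i + m))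
      fvtLoopA tokens indent m fuel (i + m) (lines ++ [indent ++ PySem.Str.join " " chunk])
    else lines

def format_voice_tokens (tokens : List String) (indent : String) (max_tokens_per_line : Int) : String :=
  let lines := fvtLoopA tokens indent max_tokens_per_line (tokens.length + 1) 0 []
  let lines := if lines = [] then [indent ++ "R1"] else lines
  PySem.Str.join "\n" lines

-- ===== PORT B =====
-- one streaming pass: push each token into `current`, flush when it reaches the limit
def fvtStep (indent : String) (m : Int) (st : List String × List String) (tok : String) :
    List String × List String :=
  let cur := st.2 ++ [tok]
  if (cur.length : Int) = m then (st.1 ++ [indent ++ PySem.Str.join " " cur], [])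
  else (st.1, cur)

def format_voice_tokens_alt (tokens : List String) (indent : String) (max_tokens_per_line : Int) : String :=
  let st := tokens.foldl (fvtStep indent max_tokens_per_line) ([], [])
  let lines := if st.2 ≠ [] then st.1 ++ [indent ++ PySem.Str.join " " st.2] else st.1
  let lines := if lines = [] then [indent ++ "R1"] else lines
  PySem.Str.join "\n" lines

-- ===== PRECONDITION & SPEC =====
-- Pre_ excludes only inputs where Python A never returns: with max_tokens_per_line ≤ 0 and a
-- non-empty token list the while loop's index never advances past the end, so A diverges.
def Pre_format_voice_tokens (tokens : List String) (indent : String) (max_tokens_per_line : Int) : Prop :=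
  tokens = [] ∨ 1 ≤ max_tokens_per_line
instance (tokens : List String) (indent : String) (max_tokens_per_line : Int) : Decidable (Pre_format_voice_tokens tokens indent max_tokens_per_line) := by unfold Pre_format_voice_tokens; infer_instance

def pvWitness_format_voice_tokens : List String × String × Int := (["a", "b", "c"], "  ", 2)

def Spec_format_voice_tokens (tokens : List String) (indent : String) (max_tokens_per_line : Int) (out : String) : Prop := out = format_voice_tokens_alt tokens indent max_tokens_per_line
instance (tokens : List String) (indent : String) (max_tokens_per_line : Int) (out : String) : Decidable (Spec_format_voice_tokens tokens indent max_tokens_per_line out) := by unfold Spec_format_voice_tokens; infer_instance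

-- ===== CLAIM (what is proved, stated in full; the proofs are below) =====
def Claim_equal_format_voice_tokens : Prop := ∀ (tokens : List String) (indent : String) (max_tokens_per_line : Int), Dom_format_voice_tokens tokens indent max_tokens_per_line → Pre_format_voice_tokens tokens indent max_tokens_per_line → Spec_format_voice_tokens tokens indent max_tokens_per_line (format_voice_tokens tokens indent max_tokens_per_line)

-- ===== LEMMAS AND PROOFS =====

-- common reference: chunks of size k+1, each rendered as a line
def fvtChunks (indent : String) (k : Nat) : List String → List String
  | [] => []
  | x :: xs => (indent ++ PySem.Str.join " " (x :: xs.take k)) :: fvtChunks indent k (xs.drop k)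
termination_by xs => xs.length
decreasing_by simp

theorem fvtChunks_nil (indent : String) (k : Nat) : fvtChunks indent k [] = [] := by
  rw [fvtChunks.eq_def]

theorem fvtChunks_cons (indent : String) (k : Nat) (x : String) (xs : List String) :
    fvtChunks indent k (x :: xs)
      = (indent ++ PySem.Str.join " " (x :: xs.take k)) :: fvtChunks indent k (xs.drop k) := by
  rw [fvtChunks.eq_def]

theorem fvtChunks_short (indent : String) (k : Nat) (x : String) (xs : List String)
    (h : xs.length ≤ k) :
    fvtChunks indent k (x :: xs) = [indent ++ PySem.Str.join " " (x :: xs)] := by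
  rw [fvtChunks_cons, List.take_of_length_le h, List.drop_eq_nil_of_le h, fvtChunks_nil]

theorem fvtChunks_full (indent : String) (k : Nat) (zs ys : List String)
    (h : zs.length = k + 1) :
    fvtChunks indent k (zs ++ ys) = (indent ++ PySem.Str.join " " zs) :: fvtChunks indent k ys := by
  cases zs with
  | nil => simp at h
  | cons x xs =>
    have hx : xs.length = k := by simp at h; omega
    subst hx
    rw [List.cons_append, fvtChunks_cons, List.take_left, List.drop_left]

theorem fvtLoopA_eq_chunks (tokens : List String) (indent : String) (k : Nat) :
    ∀ (fuel i : Nat) (lines : List String), tokens.length - i ≤ fuel →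
    fvtLoopA tokens indent ((k : Int) + 1) fuel (i : Int) lines
      = lines ++ fvtChunks indent k (tokens.drop i) := by
  intro fuel
  induction fuel with
  | zero =>
    intro i lines h
    have hle : tokens.length ≤ i := by omega
    simp [fvtLoopA, List.drop_eq_nil_of_le hle, fvtChunks_nil]
  | succ fuel ih =>
    intro i lines h
    by_cases hi : i < tokens.length
    · have hlt : (i : Int) < (tokens.length : Int) := by exact_mod_cast hi
      have hslice : PySem.List.slice tokens (some (i : Int)) (some ((i : Int) + ((k : Int) + 1)))
          = (tokens.drop i).take (k + 1) := by
        have := PySem.List.slice_natCast_add tokens i (k + 1)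
        push_cast at this
        exact this
      obtain ⟨x, xs, hx⟩ : ∃ x xs, tokens.drop i = x :: xs := by
        cases hd : tokens.drop i with
        | nil => exfalso; have := List.drop_eq_nil_iff.mp hd; omega
        | cons x xs => exact ⟨x, xs, rfl⟩
      have hdrop : tokens.drop (i + (k + 1)) = xs.drop k := by
        have h1 : (tokens.drop i).drop (k + 1) = tokens.drop (i + (k + 1)) := by
          rw [List.drop_drop]
        rw [← h1, hx]; simp
      have hcast : (i : Int) + ((k : Int) + 1) = ((i + (k + 1) : Nat) : Int) := by push_cast; ring
      rw [fvtLoopA, if_pos hlt, hslice, hcast, ih (i + (k + 1)) _ (by omega), hx, hdrop]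
      have htk : (x :: xs).take (k + 1) = x :: xs.take k := rfl
      rw [htk, fvtChunks_cons, List.append_assoc]
      rfl
    · have hge : ¬ ((i : Int) < (tokens.length : Int)) := by
        simp only [not_lt] at *; exact_mod_cast hi
      rw [fvtLoopA, if_neg hge]
      simp [List.drop_eq_nil_of_le (by omega : tokens.length ≤ i), fvtChunks_nil]

def fvtFinish (indent : String) (st : List String × List String) : List String :=
  if st.2 ≠ [] then st.1 ++ [indent ++ PySem.Str.join " " st.2] else st.1

theorem fvtFoldB_eq_chunks (indent : String) (k : Nat) :
    ∀ (ys cur lines : List String), cur.length ≤ k →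
    fvtFinish indent (ys.foldl (fvtStep indent ((k : Int) + 1)) (lines, cur))
      = lines ++ fvtChunks indent k (cur ++ ys) := by
  intro ys
  induction ys with
  | nil =>
    intro cur lines hc
    cases cur with
    | nil => simp [fvtFinish, fvtChunks_nil]
    | cons x xs =>
      have hx : xs.length ≤ k := by simp at hc; omega
      simp [fvtFinish, fvtChunks_short indent k x xs hx]
  | cons y ys ih =>
    intro cur lines hc
    rw [List.foldl_cons]
    by_cases hfull : cur.length = k
    · have hcond : (((cur ++ [y]).length : Nat) : Int) = (k : Int) + 1 := by
        simp [hfull]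
      have hstep : fvtStep indent ((k : Int) + 1) (lines, cur) y
          = (lines ++ [indent ++ PySem.Str.join " " (cur ++ [y])], []) := by
        simp only [fvtStep, hcond, if_pos]
      rw [hstep, ih [] _ (by simp)]
      have hlen : (cur ++ [y]).length = k + 1 := by simp [hfull]
      have : cur ++ y :: ys = (cur ++ [y]) ++ ys := by simp
      rw [this, fvtChunks_full indent k _ ys hlen]
      simp [List.append_assoc]
    · have hcond : ¬ ((((cur ++ [y]).length : Nat) : Int) = (k : Int) + 1) := by
        simp; omega
      have hstep : fvtStep indent ((k : Int) + 1) (lines, cur) y = (lines, cur ++ [y]) := by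
        simp only [fvtStep, hcond, if_neg, not_false_iff]
      rw [hstep, ih (cur ++ [y]) _ (by simp; omega)]
      simp

theorem fvt_eq_of_pos (tokens : List String) (indent : String) (k : Nat) :
    format_voice_tokens tokens indent ((k : Int) + 1)
      = format_voice_tokens_alt tokens indent ((k : Int) + 1) := by
  have hA := fvtLoopA_eq_chunks tokens indent k (tokens.length + 1) 0 [] (by omega)
  have hB := fvtFoldB_eq_chunks indent k tokens [] [] (by simp)
  simp only [Nat.cast_zero, List.drop_zero, List.nil_append] at hA hB
  unfold fvtFinish at hB
  simp only [format_voice_tokens, format_voice_tokens_alt, hA, hB]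

-- ===== VERDICT (by name: the statement is the Claim_ definition above) =====
theorem format_voice_tokens_spec : Claim_equal_format_voice_tokens := by
  intro tokens indent m _ hpre
  unfold Spec_format_voice_tokens
  rcases hpre with hnil | hpos
  · subst hnil
    simp [format_voice_tokens, format_voice_tokens_alt, fvtLoopA]
  · obtain ⟨k, hk⟩ : ∃ k : Nat, m = (k : Int) + 1 := ⟨(m - 1).toNat, by omega⟩
    subst hk
    exact fvt_eq_of_pos tokens indent k
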